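-- pv_equiv track=rewrite | github.com/theinfosecguy/razin | src/razin/dsl/operations/token_scan.py | _classify_token_tier
-- ===== SOURCE A (Python) =====
-- def _classify_token_tier(
--     token: str,
--     destructive_keywords: tuple[str, ...],
--     write_keywords: tuple[str, ...],
-- ) -> str:
--     """Classify a tool token into destructive, write, or read tier."""
--     segments = token.split("_")
--     for segment in segments:
--         if segment in destructive_keywords:
--             return "destructive"
--     for segment in segments:
--         if segment in write_keywords:
--             return "write"
--     return "read"
-- ===== SOURCE B (Python) =====
-- def _classify_token_tier(
--     token: str,
--     destructive_keywords: tuple[str, ...],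
--     write_keywords: tuple[str, ...],
-- ) -> str:
--     """Single pass over segments carrying a found_write flag; destructive priority kept."""
--     found_write = False
--     for segment in token.split("_"):
--         if segment in destructive_keywords:
--             return "destructive"
--         if segment in write_keywords:
--             found_write = True
--     return "write" if found_write else "read"
-- ===== Notes on version B (the rewrite author's own statement) =====
-- stated objective: alternative
-- what changed: A's two sequential scans over the segment list are merged into one pass maintaining a found_write flag, with the flag decided after the loop to preserve destructive priority.
import Mathlib
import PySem

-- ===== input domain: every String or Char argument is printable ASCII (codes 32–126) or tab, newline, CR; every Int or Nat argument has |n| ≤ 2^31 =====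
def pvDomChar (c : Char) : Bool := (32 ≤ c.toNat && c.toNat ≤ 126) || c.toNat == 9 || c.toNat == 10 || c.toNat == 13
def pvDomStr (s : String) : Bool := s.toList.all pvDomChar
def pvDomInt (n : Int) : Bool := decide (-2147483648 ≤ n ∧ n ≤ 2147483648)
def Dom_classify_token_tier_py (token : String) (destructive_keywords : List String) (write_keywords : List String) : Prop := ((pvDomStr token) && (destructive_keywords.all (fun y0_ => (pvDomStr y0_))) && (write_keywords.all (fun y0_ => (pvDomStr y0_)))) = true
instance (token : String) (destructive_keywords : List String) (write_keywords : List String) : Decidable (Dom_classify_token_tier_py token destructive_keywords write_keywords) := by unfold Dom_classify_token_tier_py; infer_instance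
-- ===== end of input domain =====

-- B merges A's two sequential scans of the segments into one pass carrying a
-- found_write flag (destructive priority preserved); objective: alternative decomposition.

-- ===== PORT A =====
-- A's first loop: return "destructive" on the first segment found in destructive_keywords
def ctA_loopD : List String → List String → Option String
  | [], _ => none
  | s :: rest, dks => if dks.contains s then some "destructive" else ctA_loopD rest dks

-- A's second loop: return "write" on the first segment found in write_keywords
def ctA_loopW : List String → List String → Option String
  | [], _ => none
  | s :: rest, wks => if wks.contains s then some "write" else ctA_loopW rest wks

def classify_token_tier_py (token : String) (destructive_keywords : List String) (write_keywords : List String) : String :=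
  let segments := (PySem.Str.split? token "_").getD []
  match ctA_loopD segments destructive_keywords with
  | some r => r
  | none =>
    match ctA_loopW segments write_keywords with
    | some r => r
    | none => "read"

-- ===== PORT B =====
-- B's single loop over segments with the found_write flag
def ctB_loop : List String → List String → List String → Bool → String
  | [], _, _, fw => if fw then "write" else "read"
  | s :: rest, dks, wks, fw =>
    if dks.contains s then "destructive"
    else ctB_loop rest dks wks (if wks.contains s then true else fw)

def classify_token_tier_py_alt (token : String) (destructive_keywords : List String) (write_keywords : List String) : String :=
  ctB_loop ((PySem.Str.split? token "_").getD []) destructive_keywords write_keywords false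

-- ===== PRECONDITION & SPEC =====
def Spec_classify_token_tier_py (token : String) (destructive_keywords : List String) (write_keywords : List String) (out : String) : Prop := out = classify_token_tier_py_alt token destructive_keywords write_keywords
instance (token : String) (destructive_keywords : List String) (write_keywords : List String) (out : String) : Decidable (Spec_classify_token_tier_py token destructive_keywords write_keywords out) := by unfold Spec_classify_token_tier_py; infer_instance

-- ===== CLAIM (what is proved, stated in full; the proofs are below) =====
def Claim_equal_classify_token_tier_py : Prop := ∀ (token : String) (destructive_keywords : List String) (write_keywords : List String), Dom_classify_token_tier_py token destructive_keywords write_keywords → Spec_classify_token_tier_py token destructive_keywords write_keywords (classify_token_tier_py token destructive_keywords write_keywords)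

-- ===== LEMMAS AND PROOFS =====
-- A's second loop only ever produces "write"
theorem ctA_loopW_write (segs wks : List String) :
    (match ctA_loopW segs wks with | some r => r | none => "write") = "write" := by
  induction segs with
  | nil => simp [ctA_loopW]
  | cons s rest ih =>
    simp only [ctA_loopW]
    by_cases hw : s ∈ wks <;> simp [hw, ih]

-- One-pass loop with flag fw = A's two scans, with fw deciding the fallthrough value
theorem ctB_loop_eq (segs dks wks : List String) (fw : Bool) :
    ctB_loop segs dks wks fw =
      match ctA_loopD segs dks with
      | some r => r
      | none =>
        match ctA_loopW segs wks with
        | some r => r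
        | none => if fw then "write" else "read" := by
  induction segs generalizing fw with
  | nil => simp [ctB_loop, ctA_loopD, ctA_loopW]
  | cons s rest ih =>
    simp only [ctB_loop, ctA_loopD, ctA_loopW]
    by_cases hd : s ∈ dks
    · simp [hd]
    · by_cases hw : s ∈ wks <;> simp [hd, hw, ih, ctA_loopW_write]

-- ===== VERDICT (by name: the statement is the Claim_ definition above) =====
theorem classify_token_tier_py_spec : Claim_equal_classify_token_tier_py := by
  intro token dks wks _
  unfold Spec_classify_token_tier_py classify_token_tier_py classify_token_tier_py_alt
  rw [ctB_loop_eq]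
  simp
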